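-- pv_equiv track=rewrite | github.com/PedroTurik/cdass | asteroides/run3.py | count_damage
-- ===== SOURCE A (Python) =====
-- def count_damage(laser):
--     total = 0
--     cur_dmg = 1
--     for i in laser:
--         if i == 'C':
--             cur_dmg *= 2
--         else:
--             total += cur_dmg
--     return total
-- ===== SOURCE B (Python) =====
-- def count_damage(laser):
--     return sum(len(seg) * 2 ** j for j, seg in enumerate(laser.split('C')))
-- ===== Notes on version B (the rewrite author's own statement) =====
-- stated objective: idiomatic
-- what changed: Replaced the per-character accumulator loop (running total and current damage) by a one-liner: split the string on the doubling character and sum len(segment) * 2**j over the enumerated segments, since segment j is preceded by exactly j doublings.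
import Mathlib
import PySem

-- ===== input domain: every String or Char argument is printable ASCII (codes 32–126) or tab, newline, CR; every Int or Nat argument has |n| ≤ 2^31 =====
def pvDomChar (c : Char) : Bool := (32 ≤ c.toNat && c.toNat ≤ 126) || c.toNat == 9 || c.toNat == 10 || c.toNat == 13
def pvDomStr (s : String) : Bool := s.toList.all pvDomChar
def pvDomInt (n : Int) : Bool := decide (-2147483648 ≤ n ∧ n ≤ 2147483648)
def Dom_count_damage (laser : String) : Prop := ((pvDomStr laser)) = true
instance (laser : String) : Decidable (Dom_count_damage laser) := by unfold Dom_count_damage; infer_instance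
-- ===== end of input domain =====

-- B replaces A's running-total/current-damage character loop by splitting on 'C' and
-- summing len(segment) * 2^j over the enumerated segments (more idiomatic, same O(n) cost).


-- ===== PORT A =====
def count_damage (laser : String) : Int :=
  (laser.toList.foldl
    (fun (st : Int × Int) i => if i = 'C' then (st.1, st.2 * 2) else (st.1 + st.2, st.2))
    (0, 1)).1

-- ===== PORT B =====
-- Source B: sum(len(seg) * 2 ** j for j, seg in enumerate(laser.split('C')));
-- segments are kept as List Char (len = .length); 2**j with j = enumerate index ≥ 0, so 2 ^ p.1.toNat.
def count_damage_alt (laser : String) : Int :=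
  (PySem.List.enumerate (PySem.Chars.splitOn laser.toList ['C'])).foldl
    (fun acc p => acc + (p.2.length : Int) * 2 ^ p.1.toNat) 0

-- ===== PRECONDITION & SPEC =====
def Spec_count_damage (laser : String) (out : Int) : Prop := out = count_damage_alt laser
instance (laser : String) (out : Int) : Decidable (Spec_count_damage laser out) := by unfold Spec_count_damage; infer_instance

-- ===== CLAIM (what is proved, stated in full; the proofs are below) =====
def Claim_equal_count_damage : Prop := ∀ (laser : String), Dom_count_damage laser → Spec_count_damage laser (count_damage laser)

-- ===== LEMMAS AND PROOFS =====

-- damage value of a character list: each non-'C' counts 1, each 'C' doubles everything after it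
def gDmg : List Char → Int
  | [] => 0
  | c :: t => if c = 'C' then 2 * gDmg t else 1 + gDmg t

lemma foldA (l : List Char) : ∀ (total cur : Int),
    (l.foldl (fun (st : Int × Int) i => if i = 'C' then (st.1, st.2 * 2) else (st.1 + st.2, st.2))
      (total, cur)).1 = total + cur * gDmg l := by
  induction l with
  | nil => intro total cur; simp [gDmg]
  | cons c t ih =>
    intro total cur
    by_cases hc : c = 'C' <;> simp [gDmg, hc, ih] <;> ring

-- structural model of splitting on the single character 'C'
def splitC (pre : List Char) : List Char → List (List Char)
  | [] => [pre]
  | c :: t => if c = 'C' then pre :: splitC [] t else splitC (pre ++ [c]) t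

lemma goC : ∀ (l : List Char) (fuel : Nat), l.length ≤ fuel → ∀ (cur : List Char) (acc : List (List Char)),
    PySem.Chars.splitOn.go ['C'] fuel l cur acc = acc.reverse ++ splitC cur.reverse l := by
  intro l
  induction l with
  | nil =>
    intro fuel _ cur acc
    cases fuel <;> simp [PySem.Chars.splitOn.go, splitC]
  | cons c t ih =>
    intro fuel h cur acc
    cases fuel with
    | zero => simp at h
    | succ f =>
      simp only [List.length_cons, Nat.succ_le_succ_iff] at h
      by_cases hc : c = 'C'
      · subst hc
        rw [show PySem.Chars.splitOn.go ['C'] (f+1) ('C'::t) cur acc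
              = PySem.Chars.splitOn.go ['C'] f t [] (cur.reverse :: acc) by
            simp [PySem.Chars.splitOn.go, List.isPrefixOf]]
        rw [ih f h [] (cur.reverse :: acc)]
        simp [splitC]
      · rw [show PySem.Chars.splitOn.go ['C'] (f+1) (c::t) cur acc
              = PySem.Chars.splitOn.go ['C'] f t (c :: cur) acc by
            simp [PySem.Chars.splitOn.go, List.isPrefixOf, Ne.symm hc]]
        rw [ih f h (c :: cur) acc]
        simp [splitC, hc]

lemma splitOn_eq_splitC (l : List Char) : PySem.Chars.splitOn l ['C'] = splitC [] l := by
  unfold PySem.Chars.splitOn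
  rw [goC l (l.length + 1) (by omega) [] []]
  simp

-- weighted sum of segment lengths, segment j weighted 2^j
def sumSegs : List (List Char) → Nat → Int
  | [], _ => 0
  | seg :: rest, j => (seg.length : Int) * 2 ^ j + sumSegs rest (j + 1)

lemma foldB (segs : List (List Char)) : ∀ (j : Nat) (acc : Int),
    (PySem.List.enumerate segs (j : Int)).foldl
      (fun acc p => acc + (p.2.length : Int) * 2 ^ p.1.toNat) acc = acc + sumSegs segs j := by
  induction segs with
  | nil => intro j acc; simp [PySem.List.enumerate_nil, sumSegs]
  | cons s rest ih =>
    intro j acc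
    rw [PySem.List.enumerate_cons]
    simp only [List.foldl_cons]
    rw [show ((j : Int) + 1) = ((j + 1 : Nat) : Int) by push_cast; ring, ih (j+1)]
    simp [sumSegs, Int.toNat_natCast]
    ring

lemma sumSegs_splitC (l : List Char) : ∀ (pre : List Char) (j : Nat),
    sumSegs (splitC pre l) j = (pre.length : Int) * 2 ^ j + 2 ^ j * gDmg l := by
  induction l with
  | nil => intro pre j; simp [splitC, sumSegs, gDmg]
  | cons c t ih =>
    intro pre j
    by_cases hc : c = 'C'
    · subst hc
      simp [splitC, sumSegs, ih, gDmg, pow_succ]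
      ring
    · simp [splitC, hc, gDmg, ih]
      ring

-- ===== VERDICT (by name: the statement is the Claim_ definition above) =====
theorem count_damage_spec : Claim_equal_count_damage := by
  intro laser _
  unfold Spec_count_damage count_damage count_damage_alt
  have hB := foldB (splitC [] laser.toList) 0 0
  push_cast at hB
  rw [foldA, splitOn_eq_splitC, hB, sumSegs_splitC]
  simp
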